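-- pv_equiv track=rewrite | github.com/roigagusti/filemon | classes/functions.py | coloreEU
-- ===== SOURCE A (Python) =====
-- def coloreEU(EU):
--     text = EU.split('_')
--     output = []
--     for eu in text:
--         site = eu[1:4]
--         eu_name = eu[5:]
--         if site == 'ono':
--             eu_output = '<span class="eu-ono">'+eu_name+'</span>'
--         elif site == 'onm':
--             eu_output = '<span class="eu-onm">'+eu_name+'</span>'
--         elif site == 'ofm':
--             eu_output = '<span class="eu-ofm">'+eu_name+'</span>'
--         elif site == 'ofo':
--             eu_output = '<span class="eu-ofo">'+eu_name+'</span>'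
--         else:
--             eu_output = '<span>'+eu_name+'</span>'
--         output.append(eu_output)
--         output_string = '_'.join(output)
--     return output_string
-- ===== SOURCE B (Python) =====
-- def _wrap(tok):
--     site = tok[1:4]
--     if site in ('ono', 'onm', 'ofm', 'ofo'):
--         return '<span class="eu-%s">%s</span>' % (site, tok[5:])
--     return '<span>%s</span>' % tok[5:]
--
-- def coloreEU(EU):
--     out = ''
--     rest = EU
--     while True:
--         head, sep, rest = rest.partition('_')
--         out += _wrap(head)
--         if not sep:
--             return out
--         out += '_'
-- ===== Notes on version B (the rewrite author's own statement) =====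
-- stated objective: alternative
-- what changed: Instead of splitting into a token list, looping with a result list, an if/elif chain of four literal spans and re-joining the accumulated list on every iteration, B consumes the string incrementally with str.partition on the underscore separator, wraps each head via a class computed from a membership test, and concatenates the output (separators included) directly into a single string accumulator; no list and no join are ever built.
import Mathlib
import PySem

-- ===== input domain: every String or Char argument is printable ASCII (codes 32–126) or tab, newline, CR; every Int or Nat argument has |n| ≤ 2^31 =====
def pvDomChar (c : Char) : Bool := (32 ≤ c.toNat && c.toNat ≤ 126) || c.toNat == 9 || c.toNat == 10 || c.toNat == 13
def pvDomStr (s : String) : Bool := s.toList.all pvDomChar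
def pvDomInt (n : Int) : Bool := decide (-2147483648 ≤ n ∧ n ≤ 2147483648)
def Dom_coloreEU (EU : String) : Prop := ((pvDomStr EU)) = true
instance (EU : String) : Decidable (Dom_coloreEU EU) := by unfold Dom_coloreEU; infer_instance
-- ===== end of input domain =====

-- B replaces A's split-into-list + five-way if/elif + per-iteration re-join with an incremental partition('_') scan that concatenates computed spans and separators into one string accumulator (alternative decomposition; same output).


-- ===== PORT A =====
-- A's loop body: slice eu[1:4], eu[5:], the five-branch if/elif chain.
def coloreEU_body (eu : List Char) : List Char :=
  let site := PySem.List.slice eu (some 1) (some 4)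
  let eu_name := PySem.List.slice eu (some 5) none
  if site = "ono".toList then "<span class=\"eu-ono\">".toList ++ eu_name ++ "</span>".toList
  else if site = "onm".toList then "<span class=\"eu-onm\">".toList ++ eu_name ++ "</span>".toList
  else if site = "ofm".toList then "<span class=\"eu-ofm\">".toList ++ eu_name ++ "</span>".toList
  else if site = "ofo".toList then "<span class=\"eu-ofo\">".toList ++ eu_name ++ "</span>".toList
  else "<span>".toList ++ eu_name ++ "</span>".toList

-- A: for each token append eu_output to output and recompute output_string = '_'.join(output);
-- state = (output, output_string). EU.split('_') is never empty, so output_string is always set.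
def coloreEU (EU : String) : String :=
  let text := PySem.Chars.splitOn EU.toList ['_']
  let st := text.foldl
    (fun (st : List (List Char) × List Char) eu =>
      let output := st.1 ++ [coloreEU_body eu]
      (output, PySem.Chars.join ['_'] output))
    ([], [])
  String.ofList st.2

-- ===== PORT B =====
-- B's _wrap: class computed from a membership test.
def coloreEU_wrap (tok : List Char) : List Char :=
  let site := PySem.List.slice tok (some 1) (some 4)
  if ["ono".toList, "onm".toList, "ofm".toList, "ofo".toList].contains site then
    "<span class=\"eu-".toList ++ site ++ "\">".toList
      ++ PySem.List.slice tok (some 5) none ++ "</span>".toList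
  else "<span>".toList ++ PySem.List.slice tok (some 5) none ++ "</span>".toList

-- hand port of rest.partition('_') (exact for the fixed one-char separator '_'):
-- returns (chars before the first '_', whether a '_' was found, chars after it).
def coloreEU_partition : List Char → List Char × Bool × List Char
  | [] => ([], false, [])
  | c :: cs =>
    if c = '_' then ([], true, cs)
    else
      let r := coloreEU_partition cs
      (c :: r.1, r.2.1, r.2.2)

theorem coloreEU_partition_lt (l : List Char) (h : (coloreEU_partition l).2.1 = true) :
    (coloreEU_partition l).2.2.length < l.length := by
  induction l with
  | nil => simp [coloreEU_partition] at h
  | cons c cs ih =>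
    by_cases hc : c = '_'
    · simp [coloreEU_partition, hc]
    · simp only [coloreEU_partition, if_neg hc] at h ⊢
      exact Nat.lt_succ_of_lt (ih h)

-- B's while-loop: partition off the next token, append its span (and '_' if a separator was found).
def coloreEU_alt_go (out rest : List Char) : List Char :=
  if h : (coloreEU_partition rest).2.1 = true then
    coloreEU_alt_go (out ++ coloreEU_wrap (coloreEU_partition rest).1 ++ ['_'])
      (coloreEU_partition rest).2.2
  else out ++ coloreEU_wrap (coloreEU_partition rest).1
termination_by rest.length
decreasing_by exact coloreEU_partition_lt rest h

def coloreEU_alt (EU : String) : String :=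
  String.ofList (coloreEU_alt_go [] EU.toList)

-- ===== PRECONDITION & SPEC =====
def Spec_coloreEU (EU : String) (out : String) : Prop := out = coloreEU_alt EU
instance (EU : String) (out : String) : Decidable (Spec_coloreEU EU out) := by unfold Spec_coloreEU; infer_instance

-- ===== CLAIM (what is proved, stated in full; the proofs are below) =====
def Claim_equal_coloreEU : Prop := ∀ (EU : String), Dom_coloreEU EU → Spec_coloreEU EU (coloreEU EU)

-- ===== LEMMAS AND PROOFS =====

-- the token list induced by repeated partition
def coloreEU_partList (l : List Char) : List (List Char) :=
  if h : (coloreEU_partition l).2.1 = true then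
    (coloreEU_partition l).1 :: coloreEU_partList (coloreEU_partition l).2.2
  else [(coloreEU_partition l).1]
termination_by l.length
decreasing_by exact coloreEU_partition_lt l h

theorem coloreEU_partList_ne_nil (l : List Char) : coloreEU_partList l ≠ [] := by
  rw [coloreEU_partList]
  split <;> simp

-- prepend p to the first block of a split
def coloreEU_prependFirst (p : List Char) : List (List Char) → List (List Char)
  | [] => [p]
  | x :: xs => (p ++ x) :: xs

-- splitOn on the one-char separator '_' agrees with repeated partition
theorem coloreEU_go_eq (fuel : Nat) (l cur : List Char) (acc : List (List Char))
    (h : l.length < fuel) :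
    PySem.Chars.splitOn.go ['_'] fuel l cur acc
      = acc.reverse ++ coloreEU_prependFirst cur.reverse (coloreEU_partList l) := by
  induction fuel generalizing l cur acc with
  | zero => omega
  | succ n ih =>
    cases l with
    | nil =>
      unfold PySem.Chars.splitOn.go
      rw [coloreEU_partList]
      simp [coloreEU_partition, coloreEU_prependFirst]
    | cons c rest =>
      unfold PySem.Chars.splitOn.go
      have hr : rest.length < n := by simp only [List.length_cons] at h; omega
      by_cases hc : c = '_'
      · subst hc
        have hp : List.isPrefixOf ['_'] ('_' :: rest) = true := by
          simp [List.isPrefixOf]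
        rw [if_pos hp]
        rw [show List.drop (['_'].length) ('_' :: rest) = rest from rfl, ih _ _ _ hr]
        have hstep : coloreEU_partList ('_' :: rest) = [] :: coloreEU_partList rest := by
          rw [coloreEU_partList]; simp [coloreEU_partition]
        rw [hstep]
        cases hpl : coloreEU_partList rest with
        | nil => exact absurd hpl (coloreEU_partList_ne_nil rest)
        | cons x xs => simp [coloreEU_prependFirst]
      · have hp : List.isPrefixOf ['_'] (c :: rest) = false := by
          simp [List.isPrefixOf]
          exact fun h => hc h.symm
        rw [if_neg (by simp [hp])]
        rw [ih _ _ _ hr]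
        have hpartc : coloreEU_partition (c :: rest)
            = (c :: (coloreEU_partition rest).1, (coloreEU_partition rest).2.1,
               (coloreEU_partition rest).2.2) := by
          simp [coloreEU_partition, hc]
        have hstep : coloreEU_partList (c :: rest)
            = coloreEU_prependFirst [c] (coloreEU_partList rest) := by
          conv_rhs => rw [coloreEU_partList]
          rw [coloreEU_partList, hpartc]
          by_cases hb : (coloreEU_partition rest).2.1 = true <;>
            simp [hb, coloreEU_prependFirst]
        rw [hstep]
        cases hpl : coloreEU_partList rest with
        | nil => exact absurd hpl (coloreEU_partList_ne_nil rest)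
        | cons x xs => simp [coloreEU_prependFirst]

theorem coloreEU_splitOn_eq (l : List Char) :
    PySem.Chars.splitOn l ['_'] = coloreEU_partList l := by
  have := coloreEU_go_eq (l.length + 1) l [] [] (by omega)
  simp only [PySem.Chars.splitOn] at *
  rw [this]
  cases hpl : coloreEU_partList l with
  | nil => exact absurd hpl (coloreEU_partList_ne_nil l)
  | cons x xs => simp [coloreEU_prependFirst]

-- join over a nonempty list, one step
theorem coloreEU_join_cons (x : List Char) (xs : List (List Char)) :
    PySem.Chars.join ['_'] (x :: xs)
      = if xs = [] then x else x ++ ['_'] ++ PySem.Chars.join ['_'] xs := by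
  cases xs with
  | nil => simp [PySem.Chars.join, List.intercalate]
  | cons y ys => simp [PySem.Chars.join, List.intercalate]

-- per-token: the if/elif chain agrees with the membership formulation
theorem coloreEU_body_eq (eu : List Char) : coloreEU_body eu = coloreEU_wrap eu := by
  unfold coloreEU_body coloreEU_wrap
  dsimp only
  split_ifs with h1 h2 h3 h4 h5 <;>
    simp_all [List.contains_eq_mem, List.mem_cons]

-- B's loop computes the join of the wrapped partition blocks
theorem coloreEU_alt_go_eq (l out : List Char) :
    coloreEU_alt_go out l
      = out ++ PySem.Chars.join ['_'] ((coloreEU_partList l).map coloreEU_wrap) := by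
  induction hl : l.length using Nat.strong_induction_on generalizing l out with
  | _ n ih =>
    subst hl
    rw [coloreEU_alt_go, coloreEU_partList]
    by_cases hb : (coloreEU_partition l).2.1 = true
    · rw [dif_pos hb, dif_pos hb]
      rw [ih _ (coloreEU_partition_lt l hb) _ _ rfl]
      rw [List.map_cons, coloreEU_join_cons]
      rw [if_neg (by simp [coloreEU_partList_ne_nil])]
      simp
    · rw [dif_neg hb, dif_neg hb]
      simp

-- A's fold: the second state component ends as the join of init ++ map, once the list is nonempty
theorem coloreEU_foldA_snd (l : List (List Char)) (init : List (List Char)) (s : List Char)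
    (hne : l ≠ []) :
    (l.foldl (fun (st : List (List Char) × List Char) eu =>
        let output := st.1 ++ [coloreEU_body eu]
        (output, PySem.Chars.join ['_'] output)) (init, s)).2
      = PySem.Chars.join ['_'] (init ++ l.map coloreEU_body) := by
  induction l generalizing init s with
  | nil => exact absurd rfl hne
  | cons x xs ih =>
    by_cases hxs : xs = []
    · subst hxs; simp [List.foldl]
    · simp only [List.foldl, List.map_cons]
      rw [ih _ _ hxs, List.append_assoc]
      rfl

-- ===== VERDICT (by name: the statement is the Claim_ definition above) =====
theorem coloreEU_spec : Claim_equal_coloreEU := by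
  intro EU _
  unfold Spec_coloreEU coloreEU coloreEU_alt
  dsimp only
  rw [coloreEU_foldA_snd _ _ _ (by rw [coloreEU_splitOn_eq]; exact coloreEU_partList_ne_nil _)]
  rw [coloreEU_alt_go_eq, coloreEU_splitOn_eq]
  simp [List.map_congr_left (fun eu _ => coloreEU_body_eq eu)]
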